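-- pv_equiv track=rewrite | github.com/pypi-data/pypi-mirror-46 | packages/umis/umis-1.0.3-cp36-cp36m-macosx_10_7_x86_64.whl/umis/umis.py | _infer_transform_options
-- ===== SOURCE A (Python) =====
-- import collections
--
-- def _infer_transform_options(transform):
--     """
--     figure out what transform options should be by examining the provided
--     regexes for keywords
--     """
--     TransformOptions = collections.namedtuple("TransformOptions",
--                                               ['CB', 'dual_index', 'triple_index', 'MB', 'SB'])
--     CB = False
--     SB = False
--     MB = False
--     dual_index = False
--     triple_index = False
--     for rx in transform.values():
--         if not rx:
--             continue
--         if "CB1" in rx: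
--             if "CB3" in rx:
--                 triple_index = True
--             else:
--                 dual_index = True
--         if "SB" in rx:
--             SB = True
--         if "CB" in rx:
--             CB = True
--         if "MB" in rx:
--             MB = True
--     return TransformOptions(CB=CB, dual_index=dual_index, triple_index=triple_index, MB=MB, SB=SB)
-- ===== SOURCE B (Python) =====
-- import collections
--
-- def _infer_transform_options(transform):
--     """figure out transform options: five independent any() passes over the
--     truthy regex values instead of one fused flag-setting loop"""
--     TransformOptions = collections.namedtuple("TransformOptions",
--                                               ['CB', 'dual_index', 'triple_index', 'MB', 'SB'])
--     vals = [rx for rx in transform.values() if rx]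
--     return TransformOptions(
--         CB=any("CB" in rx for rx in vals),
--         dual_index=any("CB1" in rx and "CB3" not in rx for rx in vals),
--         triple_index=any("CB1" in rx and "CB3" in rx for rx in vals),
--         MB=any("MB" in rx for rx in vals),
--         SB=any("SB" in rx for rx in vals))
-- ===== Notes on version B (the rewrite author's own statement) =====
-- stated objective: simpler
-- what changed: Replaces the single fused loop that mutates five flag variables with a filtered value list and five independent any() passes, one per flag.
import Mathlib
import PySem

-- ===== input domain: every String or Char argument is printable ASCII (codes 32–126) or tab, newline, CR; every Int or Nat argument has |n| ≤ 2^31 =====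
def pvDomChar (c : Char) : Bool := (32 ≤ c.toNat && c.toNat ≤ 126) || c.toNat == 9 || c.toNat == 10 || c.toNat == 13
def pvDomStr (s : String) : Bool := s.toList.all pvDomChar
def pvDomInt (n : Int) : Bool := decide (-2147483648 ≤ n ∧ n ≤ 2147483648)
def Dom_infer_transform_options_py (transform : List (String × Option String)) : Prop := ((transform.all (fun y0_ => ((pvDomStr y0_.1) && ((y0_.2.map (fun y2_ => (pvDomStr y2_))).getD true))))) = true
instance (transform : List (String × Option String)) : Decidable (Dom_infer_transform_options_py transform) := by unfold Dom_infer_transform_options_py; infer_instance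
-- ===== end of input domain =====

-- B computes the same five flags with a filtered value list and five independent any-passes
-- instead of A's single fused loop over mutable flags (objective: simpler).


-- ===== PORT A =====
-- one loop step of A: skip falsy rx, then set the five flags in A's order
def pvStepA (st : Bool × Bool × Bool × Bool × Bool) (rx : Option String) :
    Bool × Bool × Bool × Bool × Bool :=
  match rx with
  | none => st
  | some s =>
    if s = "" then st
    else
      let (cb, sb, mb, di, ti) := st
      let (di, ti) :=
        if PySem.Str.isIn "CB1" s then
          (if PySem.Str.isIn "CB3" s then (di, true) else (true, ti))
        else (di, ti)
      let sb := if PySem.Str.isIn "SB" s then true else sb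
      let cb := if PySem.Str.isIn "CB" s then true else cb
      let mb := if PySem.Str.isIn "MB" s then true else mb
      (cb, sb, mb, di, ti)

def infer_transform_options_py (transform : List (String × Option String)) : Bool × Bool × Bool × Bool × Bool :=
  let st := transform.foldl (fun st kv => pvStepA st kv.2) (false, false, false, false, false)
  -- namedtuple field order: (CB, dual_index, triple_index, MB, SB)
  (st.1, st.2.2.2.1, st.2.2.2.2, st.2.2.1, st.2.1)

-- ===== PORT B =====
-- [rx for rx in transform.values() if rx]
def pvTruthy (rx : Option String) : Option String :=
  match rx with
  | none => none
  | some s => if s = "" then none else some s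

def infer_transform_options_py_alt (transform : List (String × Option String)) : Bool × Bool × Bool × Bool × Bool :=
  let vals := (transform.map Prod.snd).filterMap pvTruthy
  (vals.any (fun s => PySem.Str.isIn "CB" s),
   vals.any (fun s => PySem.Str.isIn "CB1" s && !PySem.Str.isIn "CB3" s),
   vals.any (fun s => PySem.Str.isIn "CB1" s && PySem.Str.isIn "CB3" s),
   vals.any (fun s => PySem.Str.isIn "MB" s),
   vals.any (fun s => PySem.Str.isIn "SB" s))

-- ===== PRECONDITION & SPEC =====
def Spec_infer_transform_options_py (transform : List (String × Option String)) (out : Bool × Bool × Bool × Bool × Bool) : Prop := out = infer_transform_options_py_alt transform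
instance (transform : List (String × Option String)) (out : Bool × Bool × Bool × Bool × Bool) : Decidable (Spec_infer_transform_options_py transform out) := by unfold Spec_infer_transform_options_py; infer_instance

-- ===== CLAIM (what is proved, stated in full; the proofs are below) =====
def Claim_equal_infer_transform_options_py : Prop := ∀ (transform : List (String × Option String)), Dom_infer_transform_options_py transform → Spec_infer_transform_options_py transform (infer_transform_options_py transform)

-- ===== LEMMAS AND PROOFS =====

-- invariant: A's fold from any start state ORs the five any-passes onto it
theorem pvFoldA_eq (l : List (String × Option String)) (cb sb mb di ti : Bool) :
    l.foldl (fun st kv => pvStepA st kv.2) (cb, sb, mb, di, ti) =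
      (cb || ((l.map Prod.snd).filterMap pvTruthy).any (fun s => PySem.Str.isIn "CB" s),
       sb || ((l.map Prod.snd).filterMap pvTruthy).any (fun s => PySem.Str.isIn "SB" s),
       mb || ((l.map Prod.snd).filterMap pvTruthy).any (fun s => PySem.Str.isIn "MB" s),
       di || ((l.map Prod.snd).filterMap pvTruthy).any
               (fun s => PySem.Str.isIn "CB1" s && !PySem.Str.isIn "CB3" s),
       ti || ((l.map Prod.snd).filterMap pvTruthy).any
               (fun s => PySem.Str.isIn "CB1" s && PySem.Str.isIn "CB3" s)) := by
  induction l generalizing cb sb mb di ti with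
  | nil => simp
  | cons kv rest ih =>
    obtain ⟨k, rx⟩ := kv
    match rx with
    | none => simpa [pvStepA, pvTruthy] using ih cb sb mb di ti
    | some s =>
      by_cases hs : s = ""
      · simpa [pvStepA, pvTruthy, hs] using ih cb sb mb di ti
      · rw [List.foldl_cons]
        have hstep : pvStepA (cb, sb, mb, di, ti) (k, some s).2 =
            ((if PySem.Str.isIn "CB" s then true else cb),
             (if PySem.Str.isIn "SB" s then true else sb),
             (if PySem.Str.isIn "MB" s then true else mb),
             (if PySem.Str.isIn "CB1" s then
                (if PySem.Str.isIn "CB3" s then (di, true) else (true, ti)) else (di, ti)).1,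
             (if PySem.Str.isIn "CB1" s then
                (if PySem.Str.isIn "CB3" s then (di, true) else (true, ti)) else (di, ti)).2) := by
          simp [pvStepA, hs]
        rw [hstep, ih]
        simp only [List.map_cons, List.filterMap_cons, pvTruthy, if_neg hs, List.any_cons]
        cases h1 : PySem.Str.isIn "CB1" s <;> cases h3 : PySem.Str.isIn "CB3" s <;>
          simp [h1, h3, Bool.or_assoc, Bool.or_comm, Bool.or_left_comm]

-- ===== VERDICT (by name: the statement is the Claim_ definition above) =====
theorem infer_transform_options_py_spec : Claim_equal_infer_transform_options_py := by
  intro transform _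
  unfold Spec_infer_transform_options_py infer_transform_options_py infer_transform_options_py_alt
  rw [pvFoldA_eq]
  simp
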